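-- pv_equiv track=rewrite | github.com/7pairs/pyslash | nikkansports/baseball.py | create_score_line
-- ===== SOURCE A (Python) =====
-- def create_score_line(score):
--     """
--     スコア行(先攻のみ、もしくは後攻のみ)を構築する。
--
--     @param score: 各イニングのスコア
--     @type score: list
--     @return: スコア行
--     @rtype: str
--     """
--     # イニングスコアを連結
--     retval = ''
--     for i, run in enumerate(score):
--         if i != 0:
--             # 3イニングごとに広めに区切る
--             if i % 3 == 0:
--                 retval += '  '
--             else:
--                 retval += ' '
--         retval += run
--
--     # 構築したスコア行を返す
--     return retval
-- ===== SOURCE B (Python) =====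
-- def create_score_line(score):
--     groups = [score[i:i + 3] for i in range(0, len(score), 3)]
--     return '  '.join(' '.join(g) for g in groups)
-- ===== Notes on version B (the rewrite author's own statement) =====
-- stated objective: simpler
-- what changed: Replaces the index-modulo-guarded character accumulation with slicing the list into chunks of three and two nested joins (single space inside a chunk, double space between chunks).
import Mathlib
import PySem

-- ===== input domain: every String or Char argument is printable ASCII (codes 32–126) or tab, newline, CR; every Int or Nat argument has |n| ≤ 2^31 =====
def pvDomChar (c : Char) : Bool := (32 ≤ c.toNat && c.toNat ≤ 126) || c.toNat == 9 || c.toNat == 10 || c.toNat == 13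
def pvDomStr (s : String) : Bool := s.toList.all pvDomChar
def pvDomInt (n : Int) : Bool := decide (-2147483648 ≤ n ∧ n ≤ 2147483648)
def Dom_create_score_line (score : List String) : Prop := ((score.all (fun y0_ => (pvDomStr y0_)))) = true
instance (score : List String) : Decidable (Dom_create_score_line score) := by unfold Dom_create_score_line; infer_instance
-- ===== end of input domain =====

-- B replaces A's index-modulo-guarded accumulation by slicing the list into chunks of three and
-- two nested joins (simpler decomposition; same O(n) cost).

-- ===== PORT A =====
def create_score_line (score : List String) : String :=
  (PySem.List.enumerate score).foldl
    (fun retval iRun =>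
      (if iRun.1 ≠ 0 then
        if PySem.Int.mod iRun.1 3 = 0 then retval ++ "  " else retval ++ " "
      else retval) ++ iRun.2) ""

-- ===== PORT B =====
def create_score_line_alt (score : List String) : String :=
  let groups := (PySem.List.pyRange 0 (score.length : Int) 3).map
    (fun i => PySem.List.slice score (some i) (some (i + 3)))
  PySem.Str.join "  " (groups.map (fun g => PySem.Str.join " " g))

-- ===== PRECONDITION & SPEC =====
def Spec_create_score_line (score : List String) (out : String) : Prop := out = create_score_line_alt score
instance (score : List String) (out : String) : Decidable (Spec_create_score_line score out) := by unfold Spec_create_score_line; infer_instance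

-- ===== CLAIM (what is proved, stated in full; the proofs are below) =====
def Claim_equal_create_score_line : Prop := ∀ (score : List String), Dom_create_score_line score → Spec_create_score_line score (create_score_line score)

-- ===== LEMMAS AND PROOFS =====

/-- Proof helper: the list cut into consecutive chunks of three. -/
def chunk3 {α : Type} (xs : List α) : List (List α) :=
  if h : xs = [] then [] else xs.take 3 :: chunk3 (xs.drop 3)
termination_by xs.length
decreasing_by
  have : xs.length ≠ 0 := by simpa [List.length_eq_zero_iff] using h
  simp
  omega

/-- Proof helper: plain concatenation of a list of strings. -/
def sjoin : List String → String
  | [] => ""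
  | a :: t => a ++ sjoin t

/-- Proof helper: A's loop tail starting at index `s` (every element preceded by its separator). -/
def tailA (s : Int) : List String → String
  | [] => ""
  | x :: r => (if PySem.Int.mod s 3 = 0 then "  " else " ") ++ x ++ tailA (s + 1) r

/-- Proof helper: the chunked reading of A's tail at a chunk boundary. -/
def tailSpec (xs : List String) : String :=
  sjoin ((chunk3 xs).map (fun g => "  " ++ PySem.Str.join " " g))

/-- Proof helper: B's result expressed through `chunk3`. -/
def specLine (xs : List String) : String :=
  PySem.Str.join "  " ((chunk3 xs).map (fun g => PySem.Str.join " " g))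

theorem sjoinS_nil (sep : String) : PySem.Str.join sep [] = "" := by
  apply String.ext
  simp [PySem.Str.toList_join, PySem.Chars.join_nil]

theorem sjoinS_singleton (sep p : String) : PySem.Str.join sep [p] = p := by
  apply String.ext
  simp [PySem.Str.toList_join, PySem.Chars.join_singleton]

theorem sjoinS_cons_cons (sep p q : String) (rest : List String) :
    PySem.Str.join sep (p :: q :: rest) = p ++ sep ++ PySem.Str.join sep (q :: rest) := by
  apply String.ext
  simp [PySem.Str.toList_join, PySem.Chars.join_cons_cons, String.toList_append]

theorem chunk3_nil {α : Type} : chunk3 ([] : List α) = [] := by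
  simp [chunk3]

theorem chunk3_cons {α : Type} (xs : List α) (h : xs ≠ []) :
    chunk3 xs = xs.take 3 :: chunk3 (xs.drop 3) := by
  rw [chunk3]
  simp [h]

/-- The comprehension over `range(0, len, 3)` computes exactly `chunk3`. -/
theorem range_map_eq_chunk3_aux (m : Nat) : ∀ xs : List String, (xs.length + 2) / 3 = m →
    (List.range m).map (fun k => (xs.drop (3 * k)).take 3) = chunk3 xs := by
  induction m with
  | zero =>
    intro xs h
    have : xs = [] := by
      have : xs.length = 0 := by omega
      simpa [List.length_eq_zero_iff] using this
    subst this
    simp [chunk3_nil]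
  | succ m ih =>
    intro xs h
    have hne : xs ≠ [] := by
      intro hx
      have h0 : xs.length = 0 := by rw [hx]; rfl
      omega
    rw [chunk3_cons xs hne, List.range_succ_eq_map, List.map_cons, List.map_map]
    have hlen : xs.length ≠ 0 := by simpa [List.length_eq_zero_iff] using hne
    have hdrop : ((xs.drop 3).length + 2) / 3 = m := by
      rw [List.length_drop]
      omega
    refine List.cons_eq_cons.mpr ⟨by simp, ?_⟩
    rw [← ih (xs.drop 3) hdrop]
    apply List.map_congr_left
    intro k _
    show (xs.drop (3 * (k + 1))).take 3 = ((xs.drop 3).drop (3 * k)).take 3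
    rw [List.drop_drop]
    congr 2
    omega

theorem groups_eq_chunk3 (xs : List String) :
    (PySem.List.pyRange 0 (xs.length : Int) 3).map
      (fun i => PySem.List.slice xs (some i) (some (i + 3))) = chunk3 xs := by
  rw [PySem.List.pyRange_of_pos 0 (xs.length : Int) (by norm_num)]
  rcases hx : xs with _ | ⟨a, r⟩
  · simp [chunk3_nil]
  · rw [← hx]
    have hpos : (0 : Int) < (xs.length : Int) := by
      subst hx; simp
    have hcnt : (if (0 : Int) < (xs.length : Int) then (((xs.length : Int) - 0 + 3 - 1) / 3).toNat else 0)
        = (xs.length + 2) / 3 := by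
      rw [if_pos hpos]
      omega
    rw [hcnt, List.map_map]
    rw [← range_map_eq_chunk3_aux ((xs.length + 2) / 3) xs rfl]
    apply List.map_congr_left
    intro k _
    have h0 : (0 : Int) ≤ 0 + 3 * (k : Int) := by positivity
    have h1 : (0 : Int) ≤ 0 + 3 * (k : Int) + 3 := by positivity
    simp [Function.comp]
    rw [PySem.List.slice_toNat xs (by positivity) (by positivity)]
    have ha : ((3 * (k : Int)).toNat) = 3 * k := by omega
    have hb : ((3 * (k : Int) + 3).toNat) = 3 * k + 3 := by omega
    rw [ha, hb]
    congr 1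
    omega

theorem alt_eq_specLine (xs : List String) : create_score_line_alt xs = specLine xs := by
  unfold create_score_line_alt specLine
  rw [groups_eq_chunk3]

/-- A's fold, started at a positive index, is the accumulator followed by `tailA`. -/
theorem foldA_eq_tailA : ∀ (xs : List String) (s : Int) (acc : String), 0 < s →
    (PySem.List.enumerate xs s).foldl
      (fun retval iRun =>
        (if iRun.1 ≠ 0 then
          if PySem.Int.mod iRun.1 3 = 0 then retval ++ "  " else retval ++ " "
        else retval) ++ iRun.2) acc = acc ++ tailA s xs := by
  intro xs
  induction xs with
  | nil => intro s acc _; simp [PySem.List.enumerate, tailA, String.append_empty]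
  | cons x r ih =>
    intro s acc hs
    rw [PySem.List.enumerate_cons, List.foldl_cons]
    have hs0 : s ≠ 0 := by omega
    simp only [hs0, if_pos, ne_eq, not_false_eq_true, if_true]
    rw [ih (s + 1) _ (by omega), tailA]
    split_ifs with hm <;> simp [String.append_assoc]

theorem A_eq_head_tail (xs : List String) :
    create_score_line xs = match xs with
      | [] => ""
      | x :: r => x ++ tailA 1 r := by
  unfold create_score_line
  rcases xs with _ | ⟨x, r⟩
  · simp [PySem.List.enumerate]
  · rw [PySem.List.enumerate_cons, List.foldl_cons,
      foldA_eq_tailA r (0 + 1) _ (by norm_num)]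
    have h1 : (0 : Int) + 1 = 1 := by norm_num
    rw [h1]
    have hx : (if ((0 : Int), x).1 ≠ 0 then
          if PySem.Int.mod ((0 : Int), x).1 3 = 0 then "" ++ "  " else "" ++ " "
        else ("" : String)) ++ ((0 : Int), x).2 = x := by
      apply String.ext
      simp
    rw [hx]

/-- A's tail, entered at a chunk boundary, reads chunk by chunk. -/
theorem tailA_aligned : ∀ (n : Nat) (xs : List String) (s : Int), xs.length ≤ n → 0 < s →
    PySem.Int.mod s 3 = 0 → tailA s xs = tailSpec xs := by
  intro n
  induction n with
  | zero =>
    intro xs s hlen _ _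
    have : xs = [] := by
      have : xs.length = 0 := by omega
      simpa [List.length_eq_zero_iff] using this
    subst this
    simp [tailA, tailSpec, chunk3_nil, sjoin]
  | succ n ih =>
    intro xs s hlen hs hm
    have hm' : s % 3 = 0 := by rwa [PySem.Int.mod_eq_emod_of_pos (by norm_num)] at hm
    have hm1 : PySem.Int.mod (s + 1) 3 ≠ 0 := by
      rw [PySem.Int.mod_eq_emod_of_pos (by norm_num)]; omega
    have hm2 : PySem.Int.mod (s + 1 + 1) 3 ≠ 0 := by
      rw [PySem.Int.mod_eq_emod_of_pos (by norm_num)]; omega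
    have hm3 : PySem.Int.mod (s + 1 + 1 + 1) 3 = 0 := by
      rw [PySem.Int.mod_eq_emod_of_pos (by norm_num)]; omega
    rcases xs with _ | ⟨a, r⟩
    · simp [tailA, tailSpec, chunk3_nil, sjoin]
    rcases r with _ | ⟨b, r⟩
    · have hch : chunk3 [a] = [[a]] := by
        rw [chunk3_cons _ (by simp)]
        simp [chunk3_nil]
      simp only [tailA, tailSpec, hch, List.map_cons, List.map_nil, sjoin, sjoinS_singleton]
      rw [if_pos hm]
      try simp [String.append_empty, String.append_assoc]
    rcases r with _ | ⟨c, r⟩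
    · have hch : chunk3 [a, b] = [[a, b]] := by
        rw [chunk3_cons _ (by simp)]
        simp [chunk3_nil]
      simp only [tailA, tailSpec, hch, List.map_cons, List.map_nil, sjoin]
      rw [if_pos hm, if_neg hm1, sjoinS_cons_cons, sjoinS_singleton]
      try simp [String.append_empty, String.append_assoc]
    · have hr : r.length ≤ n := by
        simp at hlen
        omega
      have hch : chunk3 (a :: b :: c :: r) = [a, b, c] :: chunk3 r := by
        rw [chunk3_cons _ (by simp)]
        simp
      simp only [tailA]
      rw [if_pos hm, if_neg hm1, if_neg hm2, ih r _ hr (by omega) hm3]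
      unfold tailSpec
      rw [hch, List.map_cons, sjoin, sjoinS_cons_cons, sjoinS_cons_cons, sjoinS_singleton]
      simp [String.append_assoc]

/-- B's double-space join of the mapped chunks, split at the head chunk. -/
theorem joinS_eq_head_sjoin (cs : List String) (c : String) :
    PySem.Str.join "  " (c :: cs) = c ++ sjoin (cs.map (fun d => "  " ++ d)) := by
  induction cs generalizing c with
  | nil => simp [sjoinS_singleton, sjoin, String.append_empty]
  | cons d t ih =>
    rw [sjoinS_cons_cons, ih d, List.map_cons, sjoin, String.append_assoc, String.append_assoc]

theorem head_tail_eq_specLine (xs : List String) :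
    (match xs with
      | [] => ""
      | x :: r => x ++ tailA 1 r) = specLine xs := by
  rcases xs with _ | ⟨x, r⟩
  · simp [specLine, chunk3_nil, sjoinS_nil]
  have hch : chunk3 (x :: r) = (x :: r).take 3 :: chunk3 ((x :: r).drop 3) :=
    chunk3_cons _ (by simp)
  have hspec : specLine (x :: r) =
      PySem.Str.join " " ((x :: r).take 3) ++ tailSpec ((x :: r).drop 3) := by
    unfold specLine
    rw [hch, List.map_cons, joinS_eq_head_sjoin, List.map_map]
    rfl
  rw [hspec]
  have h13 : PySem.Int.mod (1 : Int) 3 ≠ 0 := by decide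
  have h23 : PySem.Int.mod (2 : Int) 3 ≠ 0 := by decide
  rcases r with _ | ⟨b, r⟩
  · simp [tailA, tailSpec, chunk3_nil, sjoin, sjoinS_singleton, String.append_empty]
  rcases r with _ | ⟨c, r⟩
  · have ht : List.take 3 [x, b] = [x, b] := rfl
    have hd : List.drop 3 [x, b] = ([] : List String) := rfl
    rw [ht, hd, sjoinS_cons_cons, sjoinS_singleton]
    simp [tailA, tailSpec, chunk3_nil, sjoin, h13, String.append_empty, String.append_assoc]
  · have h23' : ¬ PySem.Int.mod ((1 : Int) + 1) 3 = 0 := by decide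
    simp only [tailA]
    rw [if_neg h13, if_neg h23', show (1 : Int) + 1 + 1 = 3 from by norm_num,
      tailA_aligned r.length r 3 (le_refl _) (by norm_num) (by decide)]
    have ht : (x :: b :: c :: r).take 3 = [x, b, c] := by simp
    have hd : (x :: b :: c :: r).drop 3 = r := rfl
    rw [ht, hd, sjoinS_cons_cons, sjoinS_cons_cons, sjoinS_singleton]
    simp [String.append_assoc]

-- ===== VERDICT (by name: the statement is the Claim_ definition above) =====
theorem create_score_line_spec : Claim_equal_create_score_line := by
  intro score _
  unfold Spec_create_score_line
  rw [alt_eq_specLine, A_eq_head_tail, head_tail_eq_specLine]
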